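-- pv_equiv track=rewrite | github.com/Dainky/Cord-finder | Cord Finder4.py | parse_profile_text
-- ===== SOURCE A (Python) =====
-- def parse_profile_text(profile_text):
--     lines = profile_text.split('\n')
--     power, kill_points, alliance, coalition = '', '', '', ''
--     for line in lines:
--         line = line.strip()
--         if line.startswith('Power'):
--             power = line
--         elif line.startswith('Kill Points'):
--             kill_points = line
--         elif line.startswith('Alliance'):
--             alliance = line
--         elif line.startswith('Coalition'):
--             coalition = line
--     return power, kill_points, alliance, coalition
-- ===== SOURCE B (Python) =====
-- def parse_profile_text(profile_text):
--     stripped = [l.strip() for l in profile_text.split('\n')]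
--     def last(pre):
--         return next((l for l in reversed(stripped) if l.startswith(pre)), '')
--     return last('Power'), last('Kill Points'), last('Alliance'), last('Coalition')
-- ===== Notes on version B (the rewrite author's own statement) =====
-- stated objective: alternative
-- what changed: Replaces the single stateful elif-chain pass with four independent reversed scans, one per field prefix, each taking the last stripped line that starts with its prefix.
import Mathlib
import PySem

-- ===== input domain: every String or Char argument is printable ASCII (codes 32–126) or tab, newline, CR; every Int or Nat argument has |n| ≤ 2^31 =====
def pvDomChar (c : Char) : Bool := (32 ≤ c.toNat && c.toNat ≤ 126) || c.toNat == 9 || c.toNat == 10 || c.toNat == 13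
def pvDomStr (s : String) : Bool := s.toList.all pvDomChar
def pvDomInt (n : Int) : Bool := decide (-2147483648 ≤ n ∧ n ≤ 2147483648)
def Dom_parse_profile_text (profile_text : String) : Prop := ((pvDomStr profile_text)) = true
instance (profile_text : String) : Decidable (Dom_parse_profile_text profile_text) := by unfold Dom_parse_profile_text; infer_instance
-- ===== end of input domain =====

-- B replaces A's single stateful elif-chain pass with four independent reversed
-- scans (last line per prefix); an alternative decomposition, same cost.


-- ===== PORT A =====
def parse_profile_text (profile_text : String) : String × String × String × String :=
  let lines := (PySem.Str.split? profile_text "\n").getD []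
  lines.foldl (fun s line =>
    let l := PySem.Str.strip line
    if PySem.Str.startswith l "Power" then (l, s.2.1, s.2.2.1, s.2.2.2)
    else if PySem.Str.startswith l "Kill Points" then (s.1, l, s.2.2.1, s.2.2.2)
    else if PySem.Str.startswith l "Alliance" then (s.1, s.2.1, l, s.2.2.2)
    else if PySem.Str.startswith l "Coalition" then (s.1, s.2.1, s.2.2.1, l)
    else s) ("", "", "", "")

-- ===== PORT B =====
-- next((l for l in reversed(stripped) if l.startswith(pre)), '')
def pvLast (pre : String) (stripped : List String) : String :=
  match stripped.reverse.find? (fun l => PySem.Str.startswith l pre) with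
  | some l => l
  | none => ""

def parse_profile_text_alt (profile_text : String) : String × String × String × String :=
  let stripped := ((PySem.Str.split? profile_text "\n").getD []).map PySem.Str.strip
  (pvLast "Power" stripped, pvLast "Kill Points" stripped,
   pvLast "Alliance" stripped, pvLast "Coalition" stripped)

-- ===== PRECONDITION & SPEC =====
def Spec_parse_profile_text (profile_text : String) (out : String × String × String × String) : Prop := out = parse_profile_text_alt profile_text
instance (profile_text : String) (out : String × String × String × String) : Decidable (Spec_parse_profile_text profile_text out) := by unfold Spec_parse_profile_text; infer_instance

-- ===== CLAIM (what is proved, stated in full; the proofs are below) =====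
def Claim_equal_parse_profile_text : Prop := ∀ (profile_text : String), Dom_parse_profile_text profile_text → Spec_parse_profile_text profile_text (parse_profile_text profile_text)

-- ===== LEMMAS AND PROOFS =====

-- last match in stripped list, with default d (pvLast pre ls = pvLwd pre ls "")
def pvLwd (pre : String) (ls : List String) (d : String) : String :=
  match ls.reverse.find? (fun l => PySem.Str.startswith l pre) with
  | some l => l
  | none => d

lemma pvLwd_nil (pre d : String) : pvLwd pre [] d = d := rfl

lemma pvLwd_cons (pre x d : String) (ls : List String) :
    pvLwd pre (x :: ls) d = pvLwd pre ls (if PySem.Str.startswith x pre then x else d) := by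
  simp only [pvLwd, List.reverse_cons, List.find?_append]
  cases h : ls.reverse.find? (fun l => PySem.Str.startswith l pre) with
  | some l => simp
  | none =>
    cases hx : PySem.Str.startswith x pre <;>
      simp [List.find?, PySem.Str.startswith_eq] at hx ⊢ <;> simp [hx]

-- a line starting with prefix p has p's first character as its own first character
lemma head_of_sw (s p : List Char) (c : Char) (h : PySem.Chars.startswith s p = true)
    (hc : p.head? = some c) : s.head? = some c := by
  rw [PySem.Chars.startswith_iff] at h
  obtain ⟨t, ht⟩ := h
  rw [← ht]
  cases hp : p with
  | nil => simp [hp] at hc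
  | cons a as => rw [hp] at hc; simpa using hc

-- the four prefixes start with distinct letters, so they are mutually exclusive
lemma sw_excl (s p q : List Char) (cp cq : Char) (hp : p.head? = some cp)
    (hq : q.head? = some cq) (hne : cp ≠ cq)
    (h1 : PySem.Chars.startswith s p = true) : PySem.Chars.startswith s q = false := by
  by_contra h
  have h2 : PySem.Chars.startswith s q = true := by
    cases hb : PySem.Chars.startswith s q <;> simp_all
  have e1 := head_of_sw s p cp h1 hp
  have e2 := head_of_sw s q cq h2 hq
  rw [e1] at e2
  exact hne (Option.some.inj e2)

lemma foldA (ls : List String) (s : String × String × String × String) :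
    ls.foldl (fun s line =>
      let l := PySem.Str.strip line
      if PySem.Str.startswith l "Power" then (l, s.2.1, s.2.2.1, s.2.2.2)
      else if PySem.Str.startswith l "Kill Points" then (s.1, l, s.2.2.1, s.2.2.2)
      else if PySem.Str.startswith l "Alliance" then (s.1, s.2.1, l, s.2.2.2)
      else if PySem.Str.startswith l "Coalition" then (s.1, s.2.1, s.2.2.1, l)
      else s) s
    = (pvLwd "Power" (ls.map PySem.Str.strip) s.1,
       pvLwd "Kill Points" (ls.map PySem.Str.strip) s.2.1,
       pvLwd "Alliance" (ls.map PySem.Str.strip) s.2.2.1,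
       pvLwd "Coalition" (ls.map PySem.Str.strip) s.2.2.2) := by
  induction ls generalizing s with
  | nil => simp [pvLwd_nil]
  | cons x xs ih =>
    simp only [List.foldl_cons, List.map_cons, pvLwd_cons, ih]
    set l := PySem.Str.strip x with hl
    by_cases hP : PySem.Chars.startswith l.toList ['P', 'o', 'w', 'e', 'r'] = true
    · have hK := sw_excl l.toList ['P', 'o', 'w', 'e', 'r'] ['K', 'i', 'l', 'l', ' ', 'P', 'o', 'i', 'n', 't', 's'] 'P' 'K' rfl rfl (by decide) hP
      have hA := sw_excl l.toList ['P', 'o', 'w', 'e', 'r'] ['A', 'l', 'l', 'i', 'a', 'n', 'c', 'e'] 'P' 'A' rfl rfl (by decide) hP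
      have hC := sw_excl l.toList ['P', 'o', 'w', 'e', 'r'] ['C', 'o', 'a', 'l', 'i', 't', 'i', 'o', 'n'] 'P' 'C' rfl rfl (by decide) hP
      simp [hP, hK, hA, hC]
    · by_cases hK : PySem.Chars.startswith l.toList ['K', 'i', 'l', 'l', ' ', 'P', 'o', 'i', 'n', 't', 's'] = true
      · have hA := sw_excl l.toList ['K', 'i', 'l', 'l', ' ', 'P', 'o', 'i', 'n', 't', 's'] ['A', 'l', 'l', 'i', 'a', 'n', 'c', 'e'] 'K' 'A' rfl rfl (by decide) hK
        have hC := sw_excl l.toList ['K', 'i', 'l', 'l', ' ', 'P', 'o', 'i', 'n', 't', 's'] ['C', 'o', 'a', 'l', 'i', 't', 'i', 'o', 'n'] 'K' 'C' rfl rfl (by decide) hK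
        simp [hP, hK, hA, hC]
      · by_cases hA : PySem.Chars.startswith l.toList ['A', 'l', 'l', 'i', 'a', 'n', 'c', 'e'] = true
        · have hC := sw_excl l.toList ['A', 'l', 'l', 'i', 'a', 'n', 'c', 'e'] ['C', 'o', 'a', 'l', 'i', 't', 'i', 'o', 'n'] 'A' 'C' rfl rfl (by decide) hA
          simp [hP, hK, hA, hC]
        · by_cases hC : PySem.Chars.startswith l.toList ['C', 'o', 'a', 'l', 'i', 't', 'i', 'o', 'n'] = true <;>
            simp [hP, hK, hA, hC]

lemma pvLast_eq (pre : String) (ls : List String) : pvLast pre ls = pvLwd pre ls "" := rfl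

-- ===== VERDICT (by name: the statement is the Claim_ definition above) =====
theorem parse_profile_text_spec : Claim_equal_parse_profile_text := by
  intro profile_text _
  unfold Spec_parse_profile_text parse_profile_text parse_profile_text_alt
  simp only [foldA, pvLast_eq]
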